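-- pv_equiv track=rewrite | github.com/mmi-ing/Algorithm_Programmers | Hacker_Rank/no5.py | countWaysToColorHouses
-- ===== SOURCE A (Python) =====
-- def countWaysToColorHouses(n):
--     MOD = 10**9 + 7
--     dp = [[0, 0] for _ in range(n+1)]
--     dp[1][0] = 3
--     dp[1][1] = 3
--
--     for i in range(2, n//2 + 1):
--         dp[i][0] = (2*dp[i-1][0] + dp[i-1][1]) % MOD
--         dp[i][1] = (dp[i-1][0] + 2*dp[i-1][1]) % MOD
--
--     return (dp[n//2][0] + dp[n//2][1]) % MOD
-- ===== SOURCE B (Python) =====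
-- def countWaysToColorHouses(n):
--     MOD = 10**9 + 7
--     k = n // 2
--     if k < 1:
--         return 0
--     return 6 * pow(3, k - 1, MOD) % MOD
-- ===== Notes on version B (the rewrite author's own statement) =====
-- stated objective: faster
-- what changed: Replaces the O(n) DP table (pairs dp[i], which stay equal by symmetry and triple each step) by the closed form 6*3^(n//2-1) mod 1e9+7 computed with built-in modular exponentiation, returning 0 when n//2 < 1.
-- outside the precondition, e.g. on countWaysToColorHouses(0): A raises IndexError, B returns 0; on countWaysToColorHouses(-3): A raises IndexError, B returns 0
import Mathlib
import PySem

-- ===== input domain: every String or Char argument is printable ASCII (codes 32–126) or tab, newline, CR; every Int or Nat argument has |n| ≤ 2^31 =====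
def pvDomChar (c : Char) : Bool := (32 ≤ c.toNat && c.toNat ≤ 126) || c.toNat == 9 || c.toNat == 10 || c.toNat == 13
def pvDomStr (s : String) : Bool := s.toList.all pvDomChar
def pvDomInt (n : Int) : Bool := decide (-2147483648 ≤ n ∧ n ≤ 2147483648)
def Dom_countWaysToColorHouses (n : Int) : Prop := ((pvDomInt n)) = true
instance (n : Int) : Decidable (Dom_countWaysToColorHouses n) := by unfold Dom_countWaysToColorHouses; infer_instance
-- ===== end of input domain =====

-- B computes A's linear DP answer in closed form 6*3^(n//2-1) mod 1e9+7 via modular exponentiation (faster, asymptotic).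


-- ===== PORT A =====
def pvMOD : Int := 10^9 + 7

-- one loop iteration: dp[i][0] = (2*dp[i-1][0] + dp[i-1][1]) % MOD; dp[i][1] = (dp[i-1][0] + 2*dp[i-1][1]) % MOD
def pvStep (dp : List (Int × Int)) (i : Int) : List (Int × Int) :=
  let prev := (PySem.List.pyGet? dp (i - 1)).getD (0, 0)
  dp.set i.toNat (PySem.Int.mod (2 * prev.1 + prev.2) pvMOD, PySem.Int.mod (prev.1 + 2 * prev.2) pvMOD)

def countWaysToColorHouses (n : Int) : Int :=
  let dp : List (Int × Int) := List.replicate (n + 1).toNat ((0 : Int), (0 : Int))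
  let dp := dp.set 1 (3, 3)     -- dp[1][0] = 3; dp[1][1] = 3  (in-range for all n in Pre_)
  let dp := (PySem.List.pyRange 2 (PySem.Int.floordiv n 2 + 1) 1).foldl pvStep dp
  let fin := (PySem.List.pyGet? dp (PySem.Int.floordiv n 2)).getD (0, 0)
  PySem.Int.mod (fin.1 + fin.2) pvMOD

-- ===== PORT B =====
def countWaysToColorHouses_alt (n : Int) : Int :=
  let MOD : Int := 10^9 + 7
  let k := PySem.Int.floordiv n 2
  if k < 1 then 0
  else PySem.Int.mod (6 * PySem.Int.powMod 3 (k - 1).toNat MOD) MOD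

-- ===== PRECONDITION & SPEC =====
-- Pre_ excludes exactly n ≤ 0, where Python A raises IndexError (dp[1] does not exist).
def Pre_countWaysToColorHouses (n : Int) : Prop := 1 ≤ n
instance (n : Int) : Decidable (Pre_countWaysToColorHouses n) := by unfold Pre_countWaysToColorHouses; infer_instance
def pvWitness_countWaysToColorHouses : Int := (5)

def Spec_countWaysToColorHouses (n : Int) (out : Int) : Prop := out = countWaysToColorHouses_alt n
instance (n : Int) (out : Int) : Decidable (Spec_countWaysToColorHouses n out) := by unfold Spec_countWaysToColorHouses; infer_instance

-- ===== CLAIM (what is proved, stated in full; the proofs are below) =====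
def Claim_equal_countWaysToColorHouses : Prop := ∀ (n : Int), Dom_countWaysToColorHouses n → Pre_countWaysToColorHouses n → Spec_countWaysToColorHouses n (countWaysToColorHouses n)

-- ===== LEMMAS AND PROOFS =====

-- the initial dp table of A, for a table of m rows
def pvInit (m : Nat) : List (Int × Int) := (List.replicate m ((0 : Int), (0 : Int))).set 1 (3, 3)

lemma pv_mul_emod (a b M : Int) : a * (b % M) % M = a * b % M := by
  rw [Int.mul_emod, Int.emod_emod_of_dvd _ dvd_rfl, ← Int.mul_emod]

-- loop invariant: after the loop up to i = k, row k holds (3^k mod M, 3^k mod M) and the length is unchanged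
lemma pv_loopA (m k : Nat) (h1 : 1 ≤ k) (h2 : k < m) :
    ((PySem.List.pyRange 2 ((k : Int) + 1) 1).foldl pvStep (pvInit m)).length = m ∧
    PySem.List.pyGet? ((PySem.List.pyRange 2 ((k : Int) + 1) 1).foldl pvStep (pvInit m)) (k : Int)
      = some (3 ^ k % pvMOD, 3 ^ k % pvMOD) := by
  induction k, h1 using Nat.le_induction with
  | base =>
    have hr : PySem.List.pyRange 2 2 1 = [] :=
      PySem.List.pyRange_one_eq_nil (by norm_num)
    push_cast
    rw [hr]
    simp only [List.foldl_nil]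
    constructor
    · simp [pvInit]
    · simp only [pvInit]
      rw [PySem.List.pyGet?_of_nonneg ((List.replicate m ((0:Int),(0:Int))).set 1 (3,3)) (by norm_num : (0:Int) ≤ 1)]
      simp only [Int.toNat_one]
      rw [List.getElem?_set_self (by simpa using h2)]
      norm_num [pvMOD]
  | succ k hk1 ih =>
    obtain ⟨hlen, hget⟩ := ih (by omega)
    have hsplit : PySem.List.pyRange 2 ((k : Int) + 1 + 1) 1
        = PySem.List.pyRange 2 ((k : Int) + 1) 1 ++ [(k : Int) + 1] :=
      PySem.List.pyRange_one_succ_right (by exact_mod_cast by omega)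
    set L := (PySem.List.pyRange 2 ((k : Int) + 1) 1).foldl pvStep (pvInit m) with hL
    have hfold : (PySem.List.pyRange 2 ((k : Int) + 1 + 1) 1).foldl pvStep (pvInit m)
        = pvStep L ((k : Int) + 1) := by
      rw [hsplit, List.foldl_append]; rfl
    have hidx : ((k : Int) + 1 - 1) = (k : Int) := by ring
    have htn : ((k : Int) + 1).toNat = k + 1 := by omega
    have hval1 : PySem.Int.mod (2 * (3 ^ k % pvMOD) + (3 ^ k % pvMOD)) pvMOD
        = 3 ^ (k + 1) % pvMOD := by
      rw [PySem.Int.mod_eq_emod_of_pos (by norm_num [pvMOD])]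
      have h3 : 2 * ((3:Int) ^ k % pvMOD) + 3 ^ k % pvMOD = 3 * (3 ^ k % pvMOD) := by ring
      rw [h3, pv_mul_emod, pow_succ]
      ring_nf
    have hval2 : PySem.Int.mod ((3 ^ k % pvMOD) + 2 * (3 ^ k % pvMOD)) pvMOD
        = 3 ^ (k + 1) % pvMOD := by
      rw [PySem.Int.mod_eq_emod_of_pos (by norm_num [pvMOD])]
      have h3 : (3:Int) ^ k % pvMOD + 2 * (3 ^ k % pvMOD) = 3 * (3 ^ k % pvMOD) := by ring
      rw [h3, pv_mul_emod, pow_succ]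
      ring_nf
    have hstep : pvStep L ((k : Int) + 1)
        = L.set (k + 1) (3 ^ (k + 1) % pvMOD, 3 ^ (k + 1) % pvMOD) := by
      simp only [pvStep, hidx, hget, Option.getD_some, htn]
      rw [hval1, hval2]
    constructor
    · push_cast
      rw [hfold, hstep]
      simp [hlen]
    · push_cast
      rw [hfold, hstep]
      rw [show ((k : Int) + 1) = ((k + 1 : Nat) : Int) by push_cast; ring]
      rw [PySem.List.pyGet?_natCast]
      exact List.getElem?_set_self (by omega)

-- ===== VERDICT (by name: the statement is the Claim_ definition above) =====
theorem countWaysToColorHouses_spec : Claim_equal_countWaysToColorHouses := by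
  intro n _ hpre
  unfold Spec_countWaysToColorHouses
  unfold Pre_countWaysToColorHouses at hpre
  by_cases h1 : n = 1
  · subst h1; decide
  · -- 2 ≤ n, so k := n // 2 ≥ 1
    have h2 : 2 ≤ n := by omega
    set K := PySem.Int.floordiv n 2 with hK
    have hKge : 1 ≤ K := by
      rw [hK, PySem.Int.floordiv_eq_ediv_of_pos (by norm_num)]; omega
    have hKle : 2 * K ≤ n := by
      rw [hK, PySem.Int.floordiv_eq_ediv_of_pos (by norm_num)]; omega
    set k : Nat := K.toNat with hk
    have hKk : (k : Int) = K := by omega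
    have hkm : k < (n + 1).toNat := by omega
    have hk1 : 1 ≤ k := by omega
    obtain ⟨hlen, hget⟩ := pv_loopA (n + 1).toNat k hk1 hkm
    -- evaluate A
    have hA : countWaysToColorHouses n = PySem.Int.mod (3 ^ k % pvMOD + 3 ^ k % pvMOD) pvMOD := by
      simp only [countWaysToColorHouses]
      rw [show (List.replicate (n + 1).toNat ((0:Int),(0:Int))).set 1 (3,3) = pvInit (n + 1).toNat from rfl]
      rw [← hK, ← hKk, hget]
      rfl
    -- evaluate B
    have hB : countWaysToColorHouses_alt n
        = PySem.Int.mod (6 * PySem.Int.powMod 3 (k - 1) (10 ^ 9 + 7)) (10 ^ 9 + 7) := by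
      simp only [countWaysToColorHouses_alt]
      rw [← hK, if_neg (by omega), show (K - 1).toNat = k - 1 by omega]
    rw [hA, hB]
    rw [show PySem.Int.powMod 3 (k - 1) (10 ^ 9 + 7) = PySem.Int.mod (3 ^ (k - 1)) (10 ^ 9 + 7) from rfl]
    have hMpos : (0:Int) < pvMOD := by norm_num [pvMOD]
    rw [PySem.Int.mod_eq_emod_of_pos hMpos, PySem.Int.mod_eq_emod_of_pos (by norm_num),
        PySem.Int.mod_eq_emod_of_pos (by norm_num)]
    have hpv : pvMOD = 10 ^ 9 + 7 := rfl
    rw [← hpv]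
    have hsum : (3:Int) ^ k % pvMOD + 3 ^ k % pvMOD = 2 * (3 ^ k % pvMOD) := by ring
    rw [hsum, pv_mul_emod, pv_mul_emod]
    have hk' : k - 1 + 1 = k := by omega
    have h6 : (6:Int) * 3 ^ (k - 1) = 2 * 3 ^ k := by
      conv_rhs => rw [← hk', pow_succ]
      ring
    rw [h6]
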